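-- pv_equiv track=rewrite | github.com/pypi-data/pypi-mirror-74 | packages/slides-sound/slides-sound-1.0.1.tar.gz/slides-sound-1.0.1/slides_sound/soundgen.py | sum_samples
-- ===== SOURCE A (Python) =====
-- def sum_samples( sa, sb ):
--     ss = []
--     ll = max(len(sa), len(sb))
--     for idx in range(ll):
--         if idx < len(sa) and idx < len(sb):
--             ss.append(sa[idx]+sb[idx])
--         elif idx < len(sa):
--             ss.append(sa[idx])
--         elif idx < len(sb):
--             ss.append(sb[idx])
--     return ss
-- ===== SOURCE B (Python) =====
-- def sum_samples(sa, sb):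
--     head = [x + y for x, y in zip(sa, sb)]
--     tail = sa[len(sb):] if len(sa) > len(sb) else sb[len(sa):]
--     return head + tail
-- ===== Notes on version B (the rewrite author's own statement) =====
-- stated objective: simpler
-- what changed: Replaces the index loop over range(max(len)) with its three-way per-element branch by one zip pass over the common prefix plus a single bulk slice copy of the longer list's tail, with no conditional per element.
import Mathlib
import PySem

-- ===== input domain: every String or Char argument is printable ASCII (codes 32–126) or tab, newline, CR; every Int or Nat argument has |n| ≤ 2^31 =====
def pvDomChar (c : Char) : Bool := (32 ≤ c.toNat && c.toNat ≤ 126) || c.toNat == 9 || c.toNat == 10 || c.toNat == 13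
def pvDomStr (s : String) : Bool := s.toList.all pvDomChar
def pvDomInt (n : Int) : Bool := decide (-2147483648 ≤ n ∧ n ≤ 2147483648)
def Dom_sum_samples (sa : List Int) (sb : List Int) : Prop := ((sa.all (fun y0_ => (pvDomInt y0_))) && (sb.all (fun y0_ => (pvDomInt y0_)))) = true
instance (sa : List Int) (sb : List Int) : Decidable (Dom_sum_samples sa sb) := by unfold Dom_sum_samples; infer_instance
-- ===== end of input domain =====

-- B replaces A's indexed loop with its per-element three-way branch by a zip over the
-- common prefix plus one bulk tail slice of the longer list (objective: simpler).

-- ===== PORT A =====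
def sum_samples (sa : List Int) (sb : List Int) : List Int :=
  -- ss = [] is the foldl's initial accumulator; ll is inlined
  (PySem.List.pyRange 0 (max (sa.length : Int) (sb.length : Int)) 1).foldl (fun ss idx =>
    if idx < (sa.length : Int) ∧ idx < (sb.length : Int) then
      -- indices produced by range are in bounds here, so pyGetD with default 0 is exact
      ss ++ [PySem.List.pyGetD sa idx 0 + PySem.List.pyGetD sb idx 0]
    else if idx < (sa.length : Int) then
      ss ++ [PySem.List.pyGetD sa idx 0]
    else if idx < (sb.length : Int) then
      ss ++ [PySem.List.pyGetD sb idx 0]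
    else ss) []

-- ===== PORT B =====
def sum_samples_alt (sa : List Int) (sb : List Int) : List Int :=
  let head := List.zipWith (· + ·) sa sb
  let tail :=
    if (sb.length : Int) < (sa.length : Int) then
      PySem.List.slice sa (some (sb.length : Int)) none
    else
      PySem.List.slice sb (some (sa.length : Int)) none
  head ++ tail

-- ===== PRECONDITION & SPEC =====
def Spec_sum_samples (sa : List Int) (sb : List Int) (out : List Int) : Prop := out = sum_samples_alt sa sb
instance (sa : List Int) (sb : List Int) (out : List Int) : Decidable (Spec_sum_samples sa sb out) := by unfold Spec_sum_samples; infer_instance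

-- ===== CLAIM (what is proved, stated in full; the proofs are below) =====
def Claim_equal_sum_samples : Prop := ∀ (sa : List Int) (sb : List Int), Dom_sum_samples sa sb → Spec_sum_samples sa sb (sum_samples sa sb)

-- ===== LEMMAS AND PROOFS =====

-- the per-index value A's loop appends, in Nat-indexed form
def pvG (sa sb : List Int) (k : Nat) : Int :=
  if k < sa.length then
    (if k < sb.length then sa.getD k 0 + sb.getD k 0 else sa.getD k 0)
  else sb.getD k 0

theorem pv_foldl_append {α β : Type} (l : List α) (body : List β → α → List β) (g : α → β)
    (h : ∀ ss x, x ∈ l → body ss x = ss ++ [g x]) :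
    ∀ init, l.foldl body init = init ++ l.map g := by
  induction l with
  | nil => intro init; simp
  | cons a t ih =>
      intro init
      simp only [List.foldl_cons, List.map_cons]
      rw [h init a (by simp), ih (fun ss x hx => h ss x (by simp [hx]))]
      simp

theorem pvA_eq_map (sa sb : List Int) :
    sum_samples sa sb = (List.range (max sa.length sb.length)).map (pvG sa sb) := by
  unfold sum_samples
  rw [PySem.List.pyRange_one]
  have hn : ((max (sa.length : Int) (sb.length : Int)) - 0).toNat = max sa.length sb.length := by
    omega
  rw [hn, List.foldl_map,
      pv_foldl_append _ _ (fun k => pvG sa sb k)]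
  · simp
  · intro ss k hk
    have hk' : k < max sa.length sb.length := List.mem_range.mp hk
    simp only [zero_add, PySem.List.pyGetD_natCast, pvG]
    have ha : ((k : Int) < (sa.length : Int)) ↔ k < sa.length := by exact_mod_cast Iff.rfl
    have hb : ((k : Int) < (sb.length : Int)) ↔ k < sb.length := by exact_mod_cast Iff.rfl
    split_ifs with h1 h2 h3 h4 h5 <;> simp_all

theorem pv_map_range_getD (l : List Int) :
    (List.range l.length).map (fun k => l.getD k 0) = l := by
  induction l with
  | nil => rfl
  | cons a t ih =>
      simp only [List.length_cons, List.range_succ_eq_map, List.map_cons, List.map_map]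
      simpa using ih

theorem pv_map_eq_zip_tail : ∀ (sa sb : List Int),
    (List.range (max sa.length sb.length)).map (pvG sa sb) =
      List.zipWith (· + ·) sa sb ++
        (if sb.length < sa.length then sa.drop sb.length else sb.drop sa.length) := by
  intro sa
  induction sa with
  | nil =>
      intro sb
      rw [show max (List.length ([] : List Int)) sb.length = sb.length by simp]
      rw [List.map_congr_left (fun k _ => show pvG [] sb k = sb.getD k 0 by simp [pvG])]
      simpa using pv_map_range_getD sb
  | cons a ta ih =>
      intro sb
      cases sb with
      | nil =>
          have this1 : ∀ k, k < (a :: ta).length → pvG (a :: ta) [] k = (a :: ta).getD k 0 := by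
            intro k hk
            unfold pvG
            rw [if_pos hk, if_neg (by simp)]
          rw [show max (a :: ta).length (List.length ([] : List Int)) = (a :: ta).length by simp]
          rw [List.map_congr_left (fun k hk => this1 k (List.mem_range.mp hk))]
          simpa using pv_map_range_getD (a :: ta)
      | cons b tb =>
          simp only [List.length_cons, Nat.succ_max_succ, List.range_succ_eq_map,
            List.map_cons, List.map_map, List.zipWith_cons_cons]
          have h0 : pvG (a :: ta) (b :: tb) 0 = a + b := by simp [pvG]
          have hs : (pvG (a :: ta) (b :: tb)) ∘ (fun k => k + 1) = pvG ta tb := by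
            funext k
            simp only [Function.comp, pvG, List.length_cons, Nat.add_lt_add_iff_right,
              List.getD_cons_succ]
          rw [h0, hs, ih tb]
          simp only [List.cons_append, Nat.add_lt_add_iff_right, List.drop_succ_cons]

theorem pvB_eq (sa sb : List Int) :
    sum_samples_alt sa sb =
      List.zipWith (· + ·) sa sb ++
        (if sb.length < sa.length then sa.drop sb.length else sb.drop sa.length) := by
  unfold sum_samples_alt
  simp only [PySem.List.slice_from_natCast]
  split_ifs with h h' h''
  · rfl
  · exact absurd (by exact_mod_cast h) h'
  · exact absurd (by exact_mod_cast h'') h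
  · rfl

-- ===== VERDICT (by name: the statement is the Claim_ definition above) =====
theorem sum_samples_spec : Claim_equal_sum_samples := by
  intro sa sb _
  unfold Spec_sum_samples
  rw [pvA_eq_map, pvB_eq, pv_map_eq_zip_tail]
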